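-- pv_equiv track=rewrite | github.com/carlosmaniero/spoj | PALIN.py | inc_str
-- ===== SOURCE A (Python) =====
-- def inc_str(value):
--     count = len(value)
--     inverse = value[::-1]
--     count_nine = 0
--
--     for i in inverse:
--         if i == '9':
--             count_nine += 1
--         else:
--             break
--
--     if count_nine == count:
--         return '1' + '0' * count_nine
--
--     max_interval = count - count_nine - 1
--     initial = value[0:max_interval]
--     inc = str(int(value[max_interval]) + 1)
--
--     return initial + inc + '0' * count_nine
-- ===== SOURCE B (Python) =====
-- def inc_str(value):
--     carry = 1
--     res = []
--     for ch in reversed(value):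
--         if carry:
--             d = int(ch) + carry
--             res.append(str(d % 10))
--             carry = d // 10
--         else:
--             res.append(ch)
--     if carry:
--         res.append('1')
--     return ''.join(reversed(res))
-- ===== Notes on version B (the rewrite author's own statement) =====
-- stated objective: alternative
-- what changed: A counts trailing nines, slices off the prefix and increments a single digit with int/str arithmetic; B does one right-to-left pass propagating a carry and rebuilds the string.
import Mathlib
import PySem

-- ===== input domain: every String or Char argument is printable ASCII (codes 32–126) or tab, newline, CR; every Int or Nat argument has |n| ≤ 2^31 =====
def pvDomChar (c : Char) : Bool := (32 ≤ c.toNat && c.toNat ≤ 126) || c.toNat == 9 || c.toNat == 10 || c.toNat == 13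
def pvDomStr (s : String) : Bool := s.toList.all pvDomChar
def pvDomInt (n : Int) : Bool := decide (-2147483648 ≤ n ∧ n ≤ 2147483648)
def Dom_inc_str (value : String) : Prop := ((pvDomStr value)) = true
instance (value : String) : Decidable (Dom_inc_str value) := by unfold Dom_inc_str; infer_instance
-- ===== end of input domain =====

-- B replaces A's count-trailing-nines / slice / single-digit-increment arithmetic by one
-- right-to-left carry-propagation pass (alternative decomposition; return values proved equal on Pre_).

-- ===== PORT A =====
-- the 'for i in inverse: … break' loop counting leading '9's of the reversed string
def aCountNines : List Char → Nat
  | [] => 0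
  | c :: t => if c = '9' then aCountNines t + 1 else 0

def inc_str (value : String) : String :=
  let l := value.toList
  let count := l.length
  let inverse := l.reverse                         -- value[::-1]
  let count_nine := aCountNines inverse
  if count_nine = count then
    String.mk ('1' :: List.replicate count_nine '0')        -- '1' + '0' * count_nine
  else
    let max_interval := count - count_nine - 1
    let initial := PySem.List.slice l (some 0) (some (max_interval : Int))   -- value[0:max_interval]
    -- int(value[max_interval]) + 1 : index always in range here; getD's default is never used.
    -- ofStr? = none is Python's ValueError; Pre_ excludes those inputs, .getD 0 is never used there.
    let inc := PySem.Int.toStr ((PySem.Int.ofStr? (String.mk [l.getD max_interval ' '])).getD 0 + 1)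
    String.mk (initial ++ inc.toList ++ List.replicate count_nine '0')

-- ===== PORT B =====
-- the 'for ch in reversed(value)' loop; acc accumulates res in final (re-reversed) order
def bLoop : List Char → Int → List Char → List Char
  | [], carry, acc => if carry ≠ 0 then '1' :: acc else acc
  | c :: t, carry, acc =>
    if carry ≠ 0 then
      -- ofStr? = none is Python's ValueError; Pre_ excludes those inputs, .getD 0 is never used there.
      let d := (PySem.Int.ofStr? (String.mk [c])).getD 0 + carry
      bLoop t (PySem.Int.floordiv d 10) ((PySem.Int.toStr (PySem.Int.mod d 10)).toList ++ acc)
    else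
      bLoop t 0 (c :: acc)

def inc_str_alt (value : String) : String :=
  String.mk (bLoop value.toList.reverse 1 [])

-- ===== PRECONDITION & SPEC =====
-- Pre_ excludes exactly the inputs where A raises ValueError: those whose last non-nine
-- character is not a decimal digit (int() fails there); B raises there too.
def Pre_inc_str (value : String) : Prop :=
  (((value.toList.reverse.dropWhile (fun c => c = '9')).take 1).all
    (fun c => ['0','1','2','3','4','5','6','7','8'].contains c)) = true
instance (value : String) : Decidable (Pre_inc_str value) := by unfold Pre_inc_str; infer_instance

def pvWitness_inc_str : String := "5"

def Spec_inc_str (value : String) (out : String) : Prop := out = inc_str_alt value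
instance (value : String) (out : String) : Decidable (Spec_inc_str value out) := by unfold Spec_inc_str; infer_instance

-- ===== CLAIM (what is proved, stated in full; the proofs are below) =====
def Claim_equal_inc_str : Prop := ∀ (value : String), Dom_inc_str value → Pre_inc_str value → Spec_inc_str value (inc_str value)

-- ===== LEMMAS AND PROOFS =====

lemma rep_cons_shift (n : Nat) (acc : List Char) :
    List.replicate n '0' ++ '0' :: acc = '0' :: (List.replicate n '0' ++ acc) := by
  rw [show ('0' :: acc : List Char) = ['0'] ++ acc from rfl, ← List.append_assoc,
    ← List.replicate_succ', List.replicate_succ, List.cons_append]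

lemma dropWhile_head_false {p : Char → Bool} :
    ∀ (r : List Char) (c : Char) (t' : List Char), r.dropWhile p = c :: t' → p c = false := by
  intro r
  induction r with
  | nil => simp [List.dropWhile]
  | cons a r ih =>
      intro c t' h
      by_cases hp : p a
      · rw [List.dropWhile_cons_of_pos hp] at h; exact ih _ _ h
      · rw [List.dropWhile_cons_of_neg hp] at h
        cases h; simpa using hp

lemma aCountNines_replicate_append (k : Nat) (t : List Char)
    (ht : t = [] ∨ ∃ c t', t = c :: t' ∧ c ≠ '9') :
    aCountNines (List.replicate k '9' ++ t) = k := by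
  induction k with
  | zero =>
      rcases ht with h | ⟨c, t', h, hc⟩
      · simp [h, aCountNines]
      · simp [h, aCountNines, hc]
  | succ n ih => simp [List.replicate_succ, aCountNines, ih]

lemma bLoop_nines (k : Nat) (t acc : List Char) :
    bLoop (List.replicate k '9' ++ t) 1 acc = bLoop t 1 (List.replicate k '0' ++ acc) := by
  induction k generalizing acc with
  | zero => simp
  | succ n ih =>
      have e1 : PySem.Int.floordiv ((PySem.Int.ofStr? (String.mk ['9'])).getD 0 + 1) 10 = 1 := by decide
      have e2 : (PySem.Int.toStr (PySem.Int.mod ((PySem.Int.ofStr? (String.mk ['9'])).getD 0 + 1) 10)).toList = ['0'] := by decide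
      rw [List.replicate_succ, List.cons_append]
      simp only [bLoop, e1, e2]
      rw [if_pos (by norm_num), ih, List.replicate_succ, List.cons_append, rep_cons_shift]
      simp

lemma bLoop_nocarry (t acc : List Char) :
    bLoop t 0 acc = t.reverse ++ acc := by
  induction t generalizing acc with
  | nil => simp [bLoop]
  | cons c t ih => simp [bLoop, ih]

theorem inc_str_eq (value : String) (hp : Pre_inc_str value) :
    inc_str value = inc_str_alt value := by
  unfold Pre_inc_str at hp
  unfold inc_str inc_str_alt
  set l := value.toList with hl
  set r := l.reverse with hr
  set t := r.dropWhile (fun c => c = '9') with hteq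
  set k := (r.takeWhile (fun c => c = '9')).length with hkeq
  have hrep : r.takeWhile (fun c => c = '9') = List.replicate k '9' := by
    apply List.eq_replicate_of_mem
    intro c hc
    have := List.mem_takeWhile_imp hc
    simpa using this
  have hsplit : r = List.replicate k '9' ++ t := by
    rw [← hrep]
    exact (List.takeWhile_append_dropWhile ..).symm
  cases ht : t with
  | nil =>
      have hrall : r = List.replicate k '9' := by rw [hsplit, ht, List.append_nil]
      have hcount : aCountNines r = k := by
        rw [hsplit]; exact aCountNines_replicate_append k t (Or.inl ht)
      have hlen : l.length = k := by
        have : r.length = k := by rw [hrall]; simp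
        simpa [hr] using this
      have hcond : aCountNines r = l.length := by rw [hcount, hlen]
      rw [if_pos hcond, hrall, ← List.append_nil (List.replicate k '9'), bLoop_nines k [] []]
      simp [bLoop, ← hr, hcount]
  | cons c t' =>
      have hc9 : c ≠ '9' := by
        have := dropWhile_head_false r c t' (by rw [← hteq, ht])
        simpa using this
      have hcmem : c ∈ ['0','1','2','3','4','5','6','7','8'] := by
        rw [ht] at hp
        simpa using hp
      have hcount : aCountNines r = k := by
        rw [hsplit]
        exact aCountNines_replicate_append k t (Or.inr ⟨c, t', ht, hc9⟩)
      have hlval : l = t'.reverse ++ c :: List.replicate k '9' := by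
        have h0 : l = r.reverse := by rw [hr, List.reverse_reverse]
        rw [h0, hsplit, ht]
        simp
      have hlen : l.length = t'.length + 1 + k := by rw [hlval]; simp; omega
      have hcond : ¬ (aCountNines r = l.length) := by rw [hcount, hlen]; omega
      have hmi : l.length - k - 1 = t'.length := by rw [hlen]; omega
      have hinit : PySem.List.slice l (some 0) (some ((t'.length : Nat) : Int)) = t'.reverse := by
        rw [PySem.List.slice_zero_start, PySem.List.slice_to_natCast, hlval]
        rw [List.take_append_of_le_length (by simp)]
        simp
      have hget : l.getD t'.length ' ' = c := by
        rw [hlval, List.getD_eq_getElem?_getD, List.getElem?_append_right (by simp)]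
        simp
      have hdiv : PySem.Int.floordiv ((PySem.Int.ofStr? (String.mk [c])).getD 0 + 1) 10 = 0 := by
        fin_cases hcmem <;> decide
      have hmod : PySem.Int.mod ((PySem.Int.ofStr? (String.mk [c])).getD 0 + 1) 10
          = (PySem.Int.ofStr? (String.mk [c])).getD 0 + 1 := by
        fin_cases hcmem <;> decide
      have hB : bLoop r 1 [] =
          t'.reverse ++ (PySem.Int.toStr ((PySem.Int.ofStr? (String.mk [c])).getD 0 + 1)).toList
            ++ List.replicate k '0' := by
        rw [hsplit, ht, bLoop_nines k (c :: t') []]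
        simp only [bLoop]
        rw [if_pos (by norm_num), hdiv, hmod, bLoop_nocarry]
        simp
      rw [if_neg hcond, hcount, hB]
      simp only [hmi, hinit, hget]

-- ===== VERDICT (by name: the statement is the Claim_ definition above) =====
theorem inc_str_spec : Claim_equal_inc_str := by
  intro value _ hp
  unfold Spec_inc_str
  exact inc_str_eq value hp
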